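-- pv_equiv track=rewrite | github.com/FlaviusMarian27/Python | rlsd.py | f
-- ===== SOURCE A (Python) =====
-- def f ( d , l , k = 0 , r = 0 ):
--     if not r :
--         r = set()
--     if k < len(l):
--         if l[k] in d:
--             r.add(d[l[k]])
--         return f(d,l,k+1,r)
--
--     return r
-- ===== SOURCE B (Python) =====
-- def f(d, l, k=0, r=0):
--     if not r:
--         r = set()
--     found = [d[l[i]] for i in range(k, len(l)) if l[i] in d]
--     r.update(found)
--     return r
-- ===== Notes on version B (the rewrite author's own statement) =====
-- stated objective: simpler
-- what changed: Replaces A's self-recursive accumulator threading with a staged pipeline: a comprehension collects the mapped values for the indices from k, then one update merges them into the set.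
import Mathlib
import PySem

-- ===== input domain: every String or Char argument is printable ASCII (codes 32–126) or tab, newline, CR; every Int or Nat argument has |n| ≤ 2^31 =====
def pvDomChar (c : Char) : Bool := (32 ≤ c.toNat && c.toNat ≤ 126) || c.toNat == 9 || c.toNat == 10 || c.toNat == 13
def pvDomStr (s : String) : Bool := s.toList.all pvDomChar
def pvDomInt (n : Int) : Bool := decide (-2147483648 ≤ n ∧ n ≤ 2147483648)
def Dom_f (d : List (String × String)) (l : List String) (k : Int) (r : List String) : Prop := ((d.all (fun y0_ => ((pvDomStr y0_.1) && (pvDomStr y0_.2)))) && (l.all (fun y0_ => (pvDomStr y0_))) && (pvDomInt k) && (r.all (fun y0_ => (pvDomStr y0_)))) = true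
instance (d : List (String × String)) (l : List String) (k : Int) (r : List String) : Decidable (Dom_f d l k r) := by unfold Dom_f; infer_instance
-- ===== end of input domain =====

-- B replaces A's self-recursion (accumulator threaded through calls) with a staged
-- pipeline: first collect the mapped values, then merge them into the set in one
-- update; objective: simpler. A mutates the caller's set r in place when r is
-- non-empty; B performs the same mutation.

-- dict lookup on the association list (first match = PySem dict convention)
def pyLookup (d : List (String × String)) (key : String) : Option String :=
  (d.find? (fun p => p.1 == key)).map (·.2)

-- ===== PORT A =====
-- literal port of A's recursion; `if not r: r = set()` is the identity on the set's
-- list representation, so r is used directly; the `none` branch of l[k] is Python's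
-- IndexError (excluded by Pre_f)
def f (d : List (String × String)) (l : List String) (k : Int) (r : List String) : List String :=
  if k < (l.length : Int) then
    match PySem.List.pyGet? l k with
    | none => r          -- IndexError in Python (outside Pre_f)
    | some key =>
      match pyLookup d key with
      | some v => f d l (k + 1) (PySem.Set.add r v)
      | none   => f d l (k + 1) r
  else r
termination_by ((l.length : Int) - k).toNat
decreasing_by all_goals omega

-- ===== PORT B =====
-- literal port of B: the comprehension `[d[l[i]] for i in range(k, len(l)) if l[i] in d]`
-- becomes a filterMap over the range (the `none` of l[i] is Python's IndexError,
-- outside Pre_f); `r.update(found)` merges the collected values into the set in order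
def f_alt (d : List (String × String)) (l : List String) (k : Int) (r : List String) : List String :=
  let found : List String :=
    (PySem.List.pyRange k (l.length : Int) 1).filterMap
      (fun i =>
        match PySem.List.pyGet? l i with
        | none => none   -- IndexError in Python (outside Pre_f)
        | some key => pyLookup d key)
  found.foldl PySem.Set.add r

-- ===== PRECONDITION & SPEC =====
-- A (and B) raise IndexError exactly when k < -len(l): the first index accessed is
-- then out of range even under Python's negative indexing. Pre_f excludes only those.
def Pre_f (d : List (String × String)) (l : List String) (k : Int) (r : List String) : Prop :=
  -(l.length : Int) ≤ k
instance (d : List (String × String)) (l : List String) (k : Int) (r : List String) : Decidable (Pre_f d l k r) := by unfold Pre_f; infer_instance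

def pvWitness_f : (List (String × String)) × List String × Int × List String :=
  ([("a", "x"), ("b", "y")], ["b", "c", "a"], 0, [])

def Spec_f (d : List (String × String)) (l : List String) (k : Int) (r : List String) (out : List String) : Prop := out = f_alt d l k r
instance (d : List (String × String)) (l : List String) (k : Int) (r : List String) (out : List String) : Decidable (Spec_f d l k r out) := by unfold Spec_f; infer_instance

-- ===== CLAIM (what is proved, stated in full; the proofs are below) =====
def Claim_equal_f : Prop := ∀ (d : List (String × String)) (l : List String) (k : Int) (r : List String), Dom_f d l k r → Pre_f d l k r → Spec_f d l k r (f d l k r)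

-- ===== LEMMAS AND PROOFS =====

-- A's recursion unrolls to B's filterMap-then-fold pipeline, by induction on
-- len - k; inside Pre_ every accessed index is in range, so the IndexError
-- branches are unreachable
theorem f_eq_f_alt (d : List (String × String)) (l : List String) (k : Int) (r : List String)
    (hk : -(l.length : Int) ≤ k) : f d l k r = f_alt d l k r := by
  by_cases h : k < (l.length : Int)
  · rw [f, if_pos h]
    rw [f_alt]
    simp only [PySem.List.pyRange_one_cons h, List.filterMap_cons]
    cases hg : PySem.List.pyGet? l k with
    | none =>
      exfalso
      rw [PySem.List.pyGet?_eq_none_iff] at hg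
      exact hg (by simp [PySem.Raise.InRange]; omega)
    | some key =>
      simp only [hg]
      cases hlk : pyLookup d key with
      | some v =>
        simp only [List.foldl_cons]
        exact f_eq_f_alt d l (k+1) (PySem.Set.add r v) (by omega)
      | none   =>
        exact f_eq_f_alt d l (k+1) r (by omega)
  · rw [f, if_neg h, f_alt]
    simp only [PySem.List.pyRange_one_eq_nil (by omega : (l.length : Int) ≤ k),
      List.filterMap_nil, List.foldl_nil]
termination_by ((l.length : Int) - k).toNat
decreasing_by all_goals omega

-- ===== VERDICT (by name: the statement is the Claim_ definition above) =====
theorem f_spec : Claim_equal_f := by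
  intro d l k r _ hpre
  exact f_eq_f_alt d l k r hpre
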